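-- pv_equiv track=rewrite | github.com/ag-su/coding_test | class/06.binary_search.py | my_bisect_left
-- ===== SOURCE A (Python) =====
-- def my_bisect_left(nums, target):
--     start = 0
--     end = len(nums) - 1
--
--
--     while start<=end:
--         mid = (start + end) // 2
--
--         if nums[mid] >= target:
--             end = mid - 1
--
--         else:
--             start = mid + 1
--
--     return start
-- ===== SOURCE B (Python) =====
-- def my_bisect_left(nums, target):
--     # Recursive divide-and-conquer on list segments: carry the slice itself
--     # plus a base offset instead of (start, end) index bookkeeping.
--     def go(seg, base):
--         if not seg:
--             return base
--         m = (len(seg) - 1) // 2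
--         if seg[m] >= target:
--             return go(seg[:m], base)
--         else:
--             return go(seg[m + 1:], base + m + 1)
--     return go(nums, 0)
-- ===== Notes on version B (the rewrite author's own statement) =====
-- stated objective: alternative
-- what changed: Replaces the iterative while-loop over (start, end) index bounds by a recursion over actual list segments (slices) carrying a base offset accumulator.
import Mathlib
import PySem

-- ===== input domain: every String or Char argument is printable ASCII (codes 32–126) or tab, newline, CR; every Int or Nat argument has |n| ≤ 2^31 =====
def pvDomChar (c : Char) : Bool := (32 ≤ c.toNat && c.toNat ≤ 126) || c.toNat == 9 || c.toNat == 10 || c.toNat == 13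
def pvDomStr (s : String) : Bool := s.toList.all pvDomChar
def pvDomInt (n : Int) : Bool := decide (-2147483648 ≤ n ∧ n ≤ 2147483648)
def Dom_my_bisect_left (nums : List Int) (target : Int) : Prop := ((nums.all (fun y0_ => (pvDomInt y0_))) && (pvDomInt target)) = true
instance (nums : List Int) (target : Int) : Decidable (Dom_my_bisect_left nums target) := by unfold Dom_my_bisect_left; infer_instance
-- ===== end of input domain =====

-- B replaces A's iterative while-loop over (start, end) index bounds by a recursion
-- over list segments (slices) with a base offset accumulator; same values, no speed claim.


-- ===== PORT A =====
-- while start<=end: mid=(start+end)//2; if nums[mid]>=target: end=mid-1 else start=mid+1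
-- nums[mid] is ported as (pyGet? …).getD 0; mid is always in range when reached from
-- my_bisect_left (0 ≤ start ≤ mid ≤ end < len), so the default is never used there.
def bisectLoop (nums : List Int) (target : Int) (start fin : Int) : Int :=
  if h : start ≤ fin then
    let mid := PySem.Int.floordiv (start + fin) 2
    if (PySem.List.pyGet? nums mid).getD 0 ≥ target then
      bisectLoop nums target start (mid - 1)
    else
      bisectLoop nums target (mid + 1) fin
  else
    start
termination_by (fin + 1 - start).toNat
decreasing_by
  · have hb := PySem.Int.floordiv_two_mid_bounds h
    omega
  · have hb := PySem.Int.floordiv_two_mid_bounds h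
    omega

def my_bisect_left (nums : List Int) (target : Int) : Int :=
  bisectLoop nums target 0 ((nums.length : Int) - 1)

-- ===== PORT B =====
-- go(seg, base): empty → base; m=(len(seg)-1)//2; seg[m]>=target → go(seg[:m], base)
-- else go(seg[m+1:], base+m+1).  len(seg) ≥ 1 here, so (len-1)//2 is the Nat division
-- (seg.length-1)/2 exactly, seg[:m] = seg.take m, seg[m+1:] = seg.drop (m+1), and
-- seg[m] = seg.getD m 0 (0 ≤ m < len, in range).
def bisectGo (target : Int) (seg : List Int) (base : Int) : Int :=
  if hne : seg = [] then base
  else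
    let m := (seg.length - 1) / 2
    if seg.getD m 0 ≥ target then
      bisectGo target (seg.take m) base
    else
      bisectGo target (seg.drop (m + 1)) (base + (m : Int) + 1)
termination_by seg.length
decreasing_by
  · have : seg.length ≠ 0 := fun h => hne (List.eq_nil_of_length_eq_zero h)
    simp only [List.length_take]; omega
  · have : seg.length ≠ 0 := fun h => hne (List.eq_nil_of_length_eq_zero h)
    simp only [List.length_drop]; omega

def my_bisect_left_alt (nums : List Int) (target : Int) : Int :=
  bisectGo target nums 0

-- ===== PRECONDITION & SPEC =====
def Spec_my_bisect_left (nums : List Int) (target : Int) (out : Int) : Prop := out = my_bisect_left_alt nums target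
instance (nums : List Int) (target : Int) (out : Int) : Decidable (Spec_my_bisect_left nums target out) := by unfold Spec_my_bisect_left; infer_instance

-- ===== CLAIM (what is proved, stated in full; the proofs are below) =====
def Claim_equal_my_bisect_left : Prop := ∀ (nums : List Int) (target : Int), Dom_my_bisect_left nums target → Spec_my_bisect_left nums target (my_bisect_left nums target)

-- ===== LEMMAS AND PROOFS =====

-- Loop A on the closed interval [lo, hi] equals go B on the segment nums[lo..hi] with base lo.
theorem bisectLoop_eq_go (nums : List Int) (target : Int) :
    ∀ (n : Nat) (lo hi : Int), 0 ≤ lo → hi < (nums.length : Int) →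
      (hi + 1 - lo).toNat = n →
      bisectLoop nums target lo hi = bisectGo target ((nums.drop lo.toNat).take n) lo := by
  intro n
  induction n using Nat.strong_induction_on with
  | _ n ih =>
    intro lo hi hlo hhi hn
    by_cases hle : lo ≤ hi
    · -- interval nonempty, n ≥ 1
      have hn1 : 1 ≤ n := by omega
      have hb := PySem.Int.floordiv_two_mid_bounds hle
      set mid := PySem.Int.floordiv (lo + hi) 2 with hmid
      set seg := (nums.drop lo.toNat).take n with hseg
      have hlen : seg.length = n := by
        simp [hseg]; omega
      have hsegne : seg ≠ [] := by
        intro h; rw [h] at hlen; simp at hlen; omega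
      set m : Nat := (n - 1) / 2 with hm
      have hmlt : m < n := by omega
      have hmid_eq : mid = lo + (m : Int) := by
        rw [hmid, PySem.Int.floordiv_eq_iff_of_pos (by omega)]
        omega
      -- the compared element is the same on both sides
      have hidx : lo.toNat + m < nums.length := by omega
      have helem : (PySem.List.pyGet? nums mid).getD 0 = seg.getD m 0 := by
        rw [hmid_eq]
        have : lo + (m : Int) = ((lo.toNat + m : Nat) : Int) := by omega
        rw [this, PySem.List.pyGet?_natCast]
        have h1 : nums[lo.toNat + m]? = some nums[lo.toNat + m] :=
          List.getElem?_eq_getElem hidx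
        have h2 : seg.getD m 0 = nums[lo.toNat + m] := by
          have hmseg : m < seg.length := by omega
          rw [List.getD_eq_getElem seg 0 hmseg]
          simp [hseg]
        rw [h1, h2]; rfl
      rw [bisectLoop]
      simp only [hle, dif_pos]
      rw [← hmid]
      conv_rhs => rw [bisectGo]
      have hmsel : (seg.length - 1) / 2 = m := by rw [hlen]
      simp only [hsegne, dif_neg, not_false_iff, hmsel, ← helem]
      by_cases hc : (PySem.List.pyGet? nums mid).getD 0 ≥ target
      · simp only [hc, if_pos]
        have htk : seg.take m = (nums.drop lo.toNat).take m := by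
          rw [hseg, List.take_take]; congr 1; omega
        rw [htk]
        have := ih m hmlt lo (mid - 1) hlo (by omega) (by omega)
        exact this
      · simp only [hc, if_neg, not_false_iff]
        have hdr : seg.drop (m + 1) = (nums.drop (mid + 1).toNat).take (n - (m + 1)) := by
          rw [hseg, List.drop_take, List.drop_drop]
          congr 2
          omega
        rw [hdr]
        have hbase : lo + (m : Int) + 1 = mid + 1 := by omega
        rw [hbase]
        exact ih (n - (m + 1)) (by omega) (mid + 1) hi (by omega) hhi (by omega)
    · -- empty interval: n = 0
      have hn0 : n = 0 := by omega
      rw [bisectLoop]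
      simp [hle, hn0, bisectGo]

-- ===== VERDICT (by name: the statement is the Claim_ definition above) =====
theorem my_bisect_left_spec : Claim_equal_my_bisect_left := by
  intro nums target _
  unfold Spec_my_bisect_left my_bisect_left my_bisect_left_alt
  have h := bisectLoop_eq_go nums target nums.length 0 ((nums.length : Int) - 1)
    le_rfl (by omega) (by omega)
  simpa using h
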